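-- pv_equiv track=rewrite | github.com/dpamar/web-console-games | js/adventure/glorkz_to_json.py | parse_vocabulary
-- ===== SOURCE A (Python) =====
-- def parse_vocabulary(section_lines):
--     """Parse vocabulary (section 4) - group words by value"""
--     vocab = {}
--
--     for line in section_lines:
--         parts = line.strip().split()
--         if len(parts) != 2:
--             continue
--
--         try:
--             value = int(parts[0])
--             word = parts[1]
--             if value not in vocab:
--                 vocab[value] = []
--             vocab[value].append(word)
--         except ValueError:
--             continue
--
--     return vocab
-- ===== SOURCE B (Python) =====
-- def parse_vocabulary(section_lines):
--     """Parse vocabulary (section 4) - group words by value.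
--
--     Collect-then-group pipeline instead of incremental dict insertion:
--     parse every line to an optional (value, word) pair, then build the
--     grouping from the flat pair list (keys in first-occurrence order).
--     """
--     def parse(line):
--         parts = line.strip().split()
--         if len(parts) != 2:
--             return None
--         try:
--             return (int(parts[0]), parts[1])
--         except ValueError:
--             return None
--
--     pairs = [p for p in map(parse, section_lines) if p is not None]
--     order = list(dict.fromkeys(v for v, _ in pairs))
--     return {v: [w for u, w in pairs if u == v] for v in order}
-- ===== Notes on version B (the rewrite author's own statement) =====
-- stated objective: alternative
-- what changed: Replaces A's incremental per-line dict insertion (membership test, list-init, in-place append) with a collect-then-group pipeline: one pass parses lines into a flat (value, word) pair list, then the result is built by deduplicating the values in first-occurrence order and gathering each value's words with a comprehension.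
import Mathlib
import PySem

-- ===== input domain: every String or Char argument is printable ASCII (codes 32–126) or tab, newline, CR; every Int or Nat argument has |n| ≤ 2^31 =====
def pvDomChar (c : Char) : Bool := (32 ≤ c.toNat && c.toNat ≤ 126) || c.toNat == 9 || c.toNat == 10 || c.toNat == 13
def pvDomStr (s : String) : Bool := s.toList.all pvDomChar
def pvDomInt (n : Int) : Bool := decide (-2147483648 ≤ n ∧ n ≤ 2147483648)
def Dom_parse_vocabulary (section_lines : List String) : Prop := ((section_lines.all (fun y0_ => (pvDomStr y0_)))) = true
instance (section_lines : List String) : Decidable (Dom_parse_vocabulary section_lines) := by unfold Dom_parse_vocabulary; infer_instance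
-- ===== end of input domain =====

-- B groups by a collect-then-group pipeline (parse all lines to pairs, dedup values, gather words) instead of A's incremental dict insertion; alternative decomposition, same results.


-- ===== PORT A =====
-- the body of A's for-loop (one iteration over `line`, state `vocab`)
def pvStepA (vocab : PySem.Dict Int (List String)) (line : String) : PySem.Dict Int (List String) :=
  let parts := PySem.Str.split₀ (PySem.Str.strip line)
  if parts.length ≠ 2 then vocab
  else
    match PySem.Int.ofStr? (parts.getD 0 "") with   -- int(parts[0]); ValueError → skip
    | none => vocab
    | some value =>
      let word := parts.getD 1 ""
      let vocab1 := if vocab.contains value then vocab else vocab.insert value []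
      vocab1.modify value [] (fun l => l ++ [word])   -- vocab[value].append(word)

def parse_vocabulary (section_lines : List String) : List (Int × List String) :=
  (section_lines.foldl pvStepA PySem.Dict.empty).items

-- ===== PORT B =====
-- B's helper `parse`: line → optional (value, word) pair
def pvParse (line : String) : Option (Int × String) :=
  let parts := PySem.Str.split₀ (PySem.Str.strip line)
  if parts.length ≠ 2 then none
  else
    match PySem.Int.ofStr? (parts.getD 0 "") with
    | none => none
    | some v => some (v, parts.getD 1 "")

def parse_vocabulary_alt (section_lines : List String) : List (Int × List String) :=
  let pairs := (section_lines.map pvParse).filterMap id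
  let order := PySem.List.dedup (pairs.map (·.1))    -- dict.fromkeys: first occurrences, in order
  order.map (fun v => (v, (pairs.filter (fun p => p.1 == v)).map (·.2)))

-- ===== PRECONDITION & SPEC =====
def Spec_parse_vocabulary (section_lines : List String) (out : List (Int × List String)) : Prop := out = parse_vocabulary_alt section_lines
instance (section_lines : List String) (out : List (Int × List String)) : Decidable (Spec_parse_vocabulary section_lines out) := by unfold Spec_parse_vocabulary; infer_instance

-- ===== CLAIM (what is proved, stated in full; the proofs are below) =====
def Claim_equal_parse_vocabulary : Prop := ∀ (section_lines : List String), Dom_parse_vocabulary section_lines → Spec_parse_vocabulary section_lines (parse_vocabulary section_lines)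

-- ===== LEMMAS AND PROOFS =====

-- A's 'if value not in vocab: vocab[value] = []' guard is absorbed by modify
lemma guard_modify (d : PySem.Dict Int (List String)) (v : Int) (w : String) :
    (if d.contains v then d else d.insert v []).modify v [] (fun l => l ++ [w])
      = d.modify v [] (fun l => l ++ [w]) := by
  by_cases h : d.contains v
  · simp [h]
  · simp only [h, Bool.false_eq_true, if_false]
    simp only [PySem.Dict.modify, PySem.Dict.getD_insert_self]
    have hg : d.getD v [] = [] := by
      simp [PySem.Dict.getD, (PySem.Dict.get?_eq_none_iff_contains d v).2 (by simpa using h)]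
    rw [hg]
    simp only [PySem.Dict.insert, PySem.Dict.contains] at h ⊢
    have hall : ∀ p ∈ d.items, (p.1 == v) = false := by
      intro p hp
      by_contra hne
      exact h (List.any_eq_true.2 ⟨p, hp, by simpa using hne⟩)
    simp only [h, Bool.false_eq_true, if_false]
    have h2 : (d.items ++ [(v, ([] : List String))]).any (fun p => p.1 == v) = true := by simp
    simp only [h2, if_true]
    congr 1
    simp only [List.map_append]
    rw [List.map_congr_left (g := id) (fun p hp => by simp [hall p hp])]
    simp

-- one iteration of A's loop, phrased through B's parse
lemma bodyA_eq (vocab : PySem.Dict Int (List String)) (line : String) :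
    pvStepA vocab line
      = (match pvParse line with
         | none => vocab
         | some p => vocab.modify p.1 [] (fun l => l ++ [p.2])) := by
  unfold pvStepA pvParse
  by_cases h : (PySem.Str.split₀ (PySem.Str.strip line)).length ≠ 2
  · rw [if_pos h, if_pos h]
  · rw [if_neg h, if_neg h]
    cases hv : PySem.Int.ofStr? ((PySem.Str.split₀ (PySem.Str.strip line)).getD 0 "") with
    | none => rfl
    | some v =>
      generalize (PySem.Str.split₀ (PySem.Str.strip line)).getD 1 "" = w
      exact guard_modify vocab v w

-- A's fold over lines equals the grouping fold over the parsed pairs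
lemma fold_lines_eq (lines : List String) (d : PySem.Dict Int (List String)) :
    lines.foldl pvStepA d
    = ((lines.map pvParse).filterMap id).foldl
        (fun vocab p => vocab.modify p.1 [] (fun l => l ++ [p.2])) d := by
  induction lines generalizing d with
  | nil => rfl
  | cons line rest ih =>
    rw [List.foldl_cons, bodyA_eq, List.map_cons]
    cases hv : pvParse line with
    | none =>
      rw [List.filterMap_cons_none (f := @id (Option (Int × String))) rfl]
      exact ih d
    | some p =>
      rw [List.filterMap_cons_some (f := @id (Option (Int × String))) rfl, List.foldl_cons]
      exact ih _

-- an association list with nodup keys is the map of getD over its keys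
lemma items_eq_map_keys {ν : Type} (l : List (Int × ν)) (dflt : ν)
    (h : (l.map Prod.fst).Nodup) :
    l = (l.map Prod.fst).map (fun k => (k, (PySem.Dict.mk l).getD k dflt)) := by
  induction l with
  | nil => rfl
  | cons p rest ih =>
    obtain ⟨a, b⟩ := p
    simp only [List.map_cons, List.nodup_cons] at h
    have h1 : ((PySem.Dict.mk ((a, b) :: rest)).getD a dflt) = b := by
      simp [PySem.Dict.getD, PySem.Dict.get?_mk_cons]
    rw [List.map_cons, List.map_cons]
    rw [List.map_congr_left (g := fun k => (k, (PySem.Dict.mk rest).getD k dflt))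
        (fun k hk => by
          have hne : (a == k) = false := by
            simp only [beq_eq_false_iff_ne, ne_eq]
            exact fun he => h.1 (he ▸ hk)
          simp [PySem.Dict.getD, PySem.Dict.get?_mk_cons, hne])]
    rw [← ih h.2, h1]

-- ===== VERDICT (by name: the statement is the Claim_ definition above) =====
theorem parse_vocabulary_spec : Claim_equal_parse_vocabulary := by
  intro lines _
  unfold Spec_parse_vocabulary parse_vocabulary parse_vocabulary_alt
  rw [fold_lines_eq]
  generalize (lines.map pvParse).filterMap id = pairs
  have hkeys : (pairs.foldl (fun vocab p => vocab.modify p.1 [] (fun l => l ++ [p.2]))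
      PySem.Dict.empty).keys = PySem.List.dedup (pairs.map (fun p => p.1)) := by
    have h1 : (pairs.foldl (fun vocab p => vocab.modify p.1 [] (fun l => l ++ [p.2]))
        PySem.Dict.empty).keys
        = PySem.Set.update PySem.Dict.empty.keys (pairs.map (fun p => p.1)) :=
      PySem.Dict.keys_foldl_modify_key pairs (fun p => p.1) [] (fun _ p l => l ++ [p.2])
        PySem.Dict.empty
    rw [h1, PySem.List.dedup_eq_ofList]
    rfl
  have hnodup : ((pairs.foldl (fun vocab p => vocab.modify p.1 [] (fun l => l ++ [p.2]))
      PySem.Dict.empty).items.map Prod.fst).Nodup :=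
    PySem.Dict.nodup_keys_foldl_modify_key pairs (fun p => p.1) [] (fun _ p l => l ++ [p.2])
      PySem.Dict.empty List.nodup_nil
  have hgetD : ∀ c, (pairs.foldl (fun vocab p => vocab.modify p.1 [] (fun l => l ++ [p.2]))
      PySem.Dict.empty).getD c []
      = (pairs.filter (fun p => p.1 == c)).map (fun p => p.2) := by
    intro c
    have h2 := PySem.Dict.getD_foldl_modify_append pairs PySem.Dict.empty c
    rw [h2]
    rfl
  refine (items_eq_map_keys (pairs.foldl (fun vocab p => vocab.modify p.1 []
      (fun l => l ++ [p.2])) PySem.Dict.empty).items [] hnodup).trans ?_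
  have hmk : PySem.Dict.mk (pairs.foldl (fun vocab p => vocab.modify p.1 [] (fun l => l ++ [p.2]))
      PySem.Dict.empty).items
      = pairs.foldl (fun vocab p => vocab.modify p.1 [] (fun l => l ++ [p.2])) PySem.Dict.empty := rfl
  rw [hmk]
  have hkeys' : (pairs.foldl (fun vocab p => vocab.modify p.1 [] (fun l => l ++ [p.2]))
      PySem.Dict.empty).items.map Prod.fst = PySem.List.dedup (pairs.map (fun p => p.1)) := hkeys
  rw [hkeys']
  exact List.map_congr_left (fun k _ => by rw [hgetD k])
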